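-- pv_equiv track=rewrite | github.com/q798010412/untitled2 | 6.23/双指针.py | delete_1
-- ===== SOURCE A (Python) =====
-- def delete_1(nums,data):
--     slow=0
--     fast=0
--     while fast < len(nums):
--         if nums[fast]==data:
--             fast+=1
--         else:
--             nums[slow]=nums[fast]
--             slow+=1
--             fast+=1
--     return slow,nums
-- ===== SOURCE B (Python) =====
-- def delete_1(nums, data):
--     work = nums.copy()
--     while data in work:
--         work.remove(data)
--     for i in range(len(work)):
--         nums[i] = work[i]
--     return len(work), nums
-- ===== Notes on version B (the rewrite author's own statement) =====
-- stated objective: alternative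
-- what changed: Instead of A's single simultaneous read/write two-pointer scan, B takes a working copy and repeatedly deletes the first occurrence of data with list.remove until none remains, then writes the surviving elements back over the front of nums by index.
import Mathlib
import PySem

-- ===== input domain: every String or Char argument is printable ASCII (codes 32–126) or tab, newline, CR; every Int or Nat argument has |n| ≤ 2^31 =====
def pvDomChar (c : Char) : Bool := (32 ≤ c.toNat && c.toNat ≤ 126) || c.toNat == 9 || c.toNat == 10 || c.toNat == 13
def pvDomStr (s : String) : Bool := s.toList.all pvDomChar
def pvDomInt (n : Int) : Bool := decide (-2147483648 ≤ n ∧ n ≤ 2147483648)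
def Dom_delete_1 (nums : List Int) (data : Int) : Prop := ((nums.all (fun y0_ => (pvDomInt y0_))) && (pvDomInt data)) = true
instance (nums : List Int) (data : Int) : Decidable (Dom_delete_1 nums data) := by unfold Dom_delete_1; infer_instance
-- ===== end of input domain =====

-- ===== PORT A =====
-- B replaces A's two-pointer scan by repeated first-occurrence remove() on a working copy plus an
-- index writeback (alternative decomposition). A mutates nums in place; the equivalence proved here
-- is about the returned (count, list) value (B performs the same mutation on nums).

-- while fast < len(nums): read nums[fast], maybe write nums[slow]
def delete1Loop (data : Int) : List Int → Nat → Nat → Nat × List Int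
  | ns, slow, fast =>
    if _h : fast < ns.length then
      if ns.getD fast 0 = data then
        delete1Loop data ns slow (fast + 1)
      else
        delete1Loop data (ns.set slow (ns.getD fast 0)) (slow + 1) (fast + 1)
    else
      (slow, ns)
termination_by ns _slow fast => ns.length - fast
decreasing_by
  · omega
  · simp only [List.length_set]; omega

def delete_1 (nums : List Int) (data : Int) : Int × List Int :=
  let r := delete1Loop data nums 0 0
  ((r.1 : Int), r.2)

-- ===== PORT B =====
-- while data in work: work.remove(data)   (remove = delete first occurrence)
def removeAll (data : Int) (work : List Int) : List Int :=
  if data ∈ work then removeAll data (work.erase data) else work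
termination_by work.length
decreasing_by
  have h1 := List.length_erase_of_mem (by assumption : data ∈ work)
  have h2 := List.length_pos_of_mem (by assumption : data ∈ work)
  omega

-- for i in range(len(work)): nums[i] = work[i]
def writeBack (ns work : List Int) (i : Nat) : List Int :=
  if i < work.length then writeBack (ns.set i (work.getD i 0)) work (i + 1) else ns
termination_by work.length - i

def delete_1_alt (nums : List Int) (data : Int) : Int × List Int :=
  let work := removeAll data nums
  (((work.length : Nat) : Int), writeBack nums work 0)

-- ===== PRECONDITION & SPEC =====
def Spec_delete_1 (nums : List Int) (data : Int) (out : Int × List Int) : Prop := out = delete_1_alt nums data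
instance (nums : List Int) (data : Int) (out : Int × List Int) : Decidable (Spec_delete_1 nums data out) := by unfold Spec_delete_1; infer_instance

-- ===== CLAIM (what is proved, stated in full; the proofs are below) =====
def Claim_equal_delete_1 : Prop := ∀ (nums : List Int) (data : Int), Dom_delete_1 nums data → Spec_delete_1 nums data (delete_1 nums data)

-- ===== LEMMAS AND PROOFS =====

-- proof-side helper: write the values of a list consecutively starting at position i
def wbL : List Int → Nat → List Int → List Int
  | ns, _i, [] => ns
  | ns, i, v :: vs => wbL (ns.set i v) (i + 1) vs

lemma filter_erase_self (data : Int) (l : List Int) :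
    (l.erase data).filter (fun x => x ≠ data) = l.filter (fun x => x ≠ data) := by
  induction l with
  | nil => simp
  | cons a l ih =>
    by_cases h : a = data
    · subst h; simp
    · rw [List.erase_cons_tail (by simpa using h)]
      simp only [List.filter_cons, ih]

lemma removeAll_eq_filter (data : Int) (l : List Int) :
    removeAll data l = l.filter (fun x => x ≠ data) := by
  rw [removeAll]
  by_cases h : data ∈ l
  · rw [if_pos h, removeAll_eq_filter data (l.erase data), filter_erase_self]
  · rw [if_neg h]
    exact (List.filter_eq_self.2 (fun a ha => by
      simp only [ne_eq, decide_eq_true_eq]; rintro rfl; exact h ha)).symm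
termination_by l.length
decreasing_by
  have h1 := List.length_erase_of_mem h
  have h2 := List.length_pos_of_mem h
  omega

lemma writeBack_eq_wbL (vs : List Int) (ns : List Int) (i : Nat) :
    writeBack ns vs i = wbL ns i (vs.drop i) := by
  rw [writeBack]
  by_cases h : i < vs.length
  · rw [if_pos h]
    have hdrop : vs.drop i = vs.getD i 0 :: vs.drop (i + 1) := by
      rw [List.getD_eq_getElem?_getD, List.getElem?_eq_getElem h, Option.getD_some]
      exact (List.getElem_cons_drop h).symm
    rw [writeBack_eq_wbL vs (ns.set i (vs.getD i 0)) (i + 1), hdrop]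
    rfl
  · rw [if_neg h, List.drop_eq_nil_of_le (by omega)]
    rfl
termination_by vs.length - i

lemma delete1Loop_eq (data : Int) (ns : List Int) (slow fast : Nat)
    (hsf : slow ≤ fast) :
    delete1Loop data ns slow fast =
      (slow + ((ns.drop fast).filter (fun x => x ≠ data)).length,
       wbL ns slow ((ns.drop fast).filter (fun x => x ≠ data))) := by
  by_cases h : fast < ns.length
  · have hdrop : ns.drop fast = ns.getD fast 0 :: ns.drop (fast + 1) := by
      rw [List.getD_eq_getElem?_getD, List.getElem?_eq_getElem h, Option.getD_some]
      exact (List.getElem_cons_drop h).symm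
    by_cases heq : ns.getD fast 0 = data
    · rw [delete1Loop]
      simp only [h, dif_pos, heq, if_pos]
      rw [delete1Loop_eq data ns slow (fast + 1) (by omega), hdrop]
      rw [List.getD_eq_getElem?_getD] at heq
      simp [heq]
    · rw [delete1Loop]
      simp only [h, dif_pos, heq, if_false]
      rw [delete1Loop_eq data (ns.set slow (ns.getD fast 0)) (slow + 1) (fast + 1) (by omega)]
      have hd2 : (ns.set slow (ns.getD fast 0)).drop (fast + 1) = ns.drop (fast + 1) := by
        apply List.ext_getElem
        · simp
        · intro k hk1 hk2
          simp only [List.getElem_drop]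
          rw [List.getElem_set_ne (by omega)]
      rw [hd2, hdrop]
      simp only [List.filter_cons, heq, decide_not]
      simp [wbL]
      omega
  · rw [delete1Loop]
    simp only [h, dif_neg, not_false_iff]
    rw [List.drop_eq_nil_of_le (by omega)]
    simp [wbL]
termination_by ns.length - fast
decreasing_by
  · omega
  · simp only [List.length_set]; omega

-- ===== VERDICT =====
theorem delete_1_spec : Claim_equal_delete_1 := by
  intro nums data _
  unfold Spec_delete_1 delete_1 delete_1_alt
  rw [delete1Loop_eq data nums 0 0 (le_refl 0), removeAll_eq_filter]
  simp [writeBack_eq_wbL]
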